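-- pv_equiv track=rewrite | github.com/melsner/transformerbyexample | script/ruleFeatures.py | ruleDescription
-- ===== SOURCE A (Python) =====
-- def chunkRule(rule):
--     currType = None
--     seq = []
--     curr = []
--     for chunk in rule:
--         chunkType = chunk[0]
--         if chunkType == currType:
--             curr.append(chunk)
--         else:
--             curr = []
--             currType = chunk[0]
--             seq.append(curr)
--             curr.append(chunk)
--
--     if not seq[-1]:
--         seq = seq[:-1]
--
--     return seq
--
-- def locateChunks(seq):
--     stemInds = []
--     for ind, subseq in enumerate(seq):
--         if subseq[0] == "*":
--             stemInds.append(ind)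
--
--     res = []
--     for ind, subseq in enumerate(seq):
--         if ind in stemInds:
--             stemBefore = None
--             stemAfter = None
--         else:
--             stemBefore = stemInds and ind > stemInds[0]
--             stemAfter = stemInds and ind < stemInds[-1]
--
--         for char in subseq:
--             res.append((char, ind, stemBefore, stemAfter))
--
--     return res
--
-- def ruleDescription(rule):
--     res = set()
--
--     if rule == ("*",):
--         res.add("RULE_SYNCRETIC")
--
--     for chunk, chunkInd, stemBefore, stemAfter in locateChunks(chunkRule(rule)):
--         if chunk == "*":
--             continue
--         elif not stemBefore:
--             res.add("RULE_PREF")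
--         elif not stemAfter:
--             res.add("RULE_SUFF")
--         elif stemBefore and stemAfter:
--             res.add("RULE_STEM")
--         else:
--             #pathological: rule with no identifiable stem content
--             res.add("RULE_SUPPLETIVE")
--
--     return res
-- ===== SOURCE B (Python) =====
-- def ruleDescription(rule):
--     res = set()
--
--     if rule == ("*",):
--         res.add("RULE_SYNCRETIC")
--
--     n = len(rule)
--     # positional pass, no run grouping: position j starts a stem run iff the
--     # chunk there is exactly "*" and it opens a new run (first char changes)
--     stem_start = [rule[j] == "*" and (j == 0 or rule[j][0] != rule[j - 1][0])
--                   for j in range(n)]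
--
--     # suffix scan: after[j] == some stem run starts strictly after position j
--     after = []
--     seen = False
--     for flag in reversed(stem_start):
--         after.append(seen)
--         seen = seen or flag
--     after.reverse()
--
--     before = False      # some stem run starts strictly before position j
--     in_stem = False     # position j lies inside a stem run
--     for j in range(n):
--         chunk = rule[j]
--         if j == 0 or chunk[0] != rule[j - 1][0]:
--             in_stem = (chunk == "*")
--         if chunk != "*":
--             if in_stem or not before:
--                 res.add("RULE_PREF")
--             elif not after[j]:
--                 res.add("RULE_SUFF")
--             else:
--                 res.add("RULE_STEM")
--         before = before or stem_start[j]
--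
--     return res
-- ===== Notes on version B (the rewrite author's own statement) =====
-- stated objective: alternative
-- what changed: B never builds A's run list / stem-index list / per-chunk (char, ind, stemBefore, stemAfter) tuples: it works purely positionally, marking which positions open a stem run, computing 'stem run somewhere after j' by one reversed suffix scan, and classifying each chunk in one forward pass with two running booleans (stem-run-seen-before, inside-stem-run).
import Mathlib
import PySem

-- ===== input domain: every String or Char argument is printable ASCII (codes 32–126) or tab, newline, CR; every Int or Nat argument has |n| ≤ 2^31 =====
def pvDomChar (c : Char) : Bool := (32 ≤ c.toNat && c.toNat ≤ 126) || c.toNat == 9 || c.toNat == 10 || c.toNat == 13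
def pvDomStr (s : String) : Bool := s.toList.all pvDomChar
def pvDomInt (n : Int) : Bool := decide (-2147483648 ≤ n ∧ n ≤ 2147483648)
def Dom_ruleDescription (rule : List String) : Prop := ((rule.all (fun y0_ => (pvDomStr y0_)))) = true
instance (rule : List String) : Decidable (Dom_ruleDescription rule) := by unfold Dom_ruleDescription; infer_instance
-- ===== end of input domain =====

-- B classifies chunks purely positionally (stem-run-start marks, one reversed suffix scan, one
-- forward pass with two booleans) instead of A's run list + stem-index list + per-chunk tuple
-- expansion; same results (a different decomposition, not faster).

-- chunk[0] / run[0]: Python raises IndexError on an empty chunk (excluded by Pre_); default is never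
-- reached inside Pre_.
def pvHd0 (s : String) : Char := (PySem.Str.pyGet? s 0).getD ' '
def pvRun0 (run : List String) : String := (PySem.List.pyGet? run 0).getD ""

-- ===== PORT A =====
-- the for-loop of chunkRule; Python's seq holds the finished runs plus (by list aliasing) the
-- current run curr, so the state is (finished runs, current run); the 'if curr = []' guard is
-- exactly 'curr was never started' (only before the first chunk), when Python's seq has no last run yet
def chunkRuleLoop : List String → Option Char → List (List String) → List String →
    List (List String) × List String
  | [], _, done, curr => (done, curr)
  | chunk :: rest, currType, done, curr =>
    let chunkType := pvHd0 chunk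
    if some chunkType = currType then
      chunkRuleLoop rest currType done (curr ++ [chunk])
    else
      chunkRuleLoop rest (some chunkType) (if curr = [] then done else done ++ [curr]) [chunk]

def chunkRule (rule : List String) : List (List String) :=
  let dc := chunkRuleLoop rule none [] []
  -- 'if not seq[-1]': IndexError on the empty rule (excluded by Pre_); otherwise the last run is
  -- nonempty and nothing is dropped
  if dc.2 = [] then dc.1 else dc.1 ++ [dc.2]

def locateChunks (seq : List (List String)) : List (String × Int × Bool × Bool) :=
  let stemInds := (PySem.List.enumerate seq).foldl
    (fun acc p => if pvRun0 p.2 = "*" then acc ++ [p.1] else acc) ([] : List Int)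
  (PySem.List.enumerate seq).foldl (fun res p =>
    -- stemBefore/stemAfter: None in the stem branch, else 'stemInds and ind > stemInds[0]'
    -- (resp. '< stemInds[-1]'); only their truthiness is ever used, None and [] are falsy
    let sbsa : Bool × Bool :=
      if p.1 ∈ stemInds then (false, false)
      else (decide (stemInds ≠ [] ∧ p.1 > stemInds.headD 0),
            decide (stemInds ≠ [] ∧ p.1 < stemInds.getLastD 0))
    res ++ p.2.map (fun c => (c, p.1, sbsa.1, sbsa.2))) []

def ruleDescription (rule : List String) : List String :=
  -- res = set(); if rule == ("*",): res.add("RULE_SYNCRETIC")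
  let res : PySem.Set String :=
    if rule = ["*"] then PySem.Set.add PySem.Set.empty "RULE_SYNCRETIC" else PySem.Set.empty
  (locateChunks (chunkRule rule)).foldl (fun res t =>
    if t.1 = "*" then res
    else if t.2.2.1 = false then PySem.Set.add res "RULE_PREF"
    else if t.2.2.2 = false then PySem.Set.add res "RULE_SUFF"
    else if t.2.2.1 && t.2.2.2 then PySem.Set.add res "RULE_STEM"
    else PySem.Set.add res "RULE_SUPPLETIVE") res

-- ===== PORT B =====
-- stem_start = [rule[j] == "*" and (j == 0 or rule[j][0] != rule[j-1][0]) for j in range(n)]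
def bStemStart (rule : List String) : List Bool :=
  (PySem.List.pyRange 0 (PySem.List.len rule) 1).map (fun j =>
    decide (PySem.List.pyGetD rule j "" = "*") &&
      (decide (j = 0) ||
        decide (pvHd0 (PySem.List.pyGetD rule j "") ≠ pvHd0 (PySem.List.pyGetD rule (j - 1) ""))))

-- the reversed suffix scan building `after`, then after.reverse()
def bAfter (rule : List String) : List Bool :=
  ((bStemStart rule).reverse.foldl
    (fun (p : List Bool × Bool) flag => (p.1 ++ [p.2], p.2 || flag)) (([] : List Bool), false)).1.reverse

def ruleDescription_alt (rule : List String) : List String :=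
  let res : PySem.Set String :=
    if rule = ["*"] then PySem.Set.add PySem.Set.empty "RULE_SYNCRETIC" else PySem.Set.empty
  -- forward pass with state (res, before, in_stem)
  ((PySem.List.pyRange 0 (PySem.List.len rule) 1).foldl
    (fun (s : PySem.Set String × Bool × Bool) j =>
      let chunk := PySem.List.pyGetD rule j ""
      let inStem :=
        if decide (j = 0) || decide (pvHd0 chunk ≠ pvHd0 (PySem.List.pyGetD rule (j - 1) "")) then
          decide (chunk = "*")
        else s.2.2
      let res' :=
        if chunk ≠ "*" then
          if inStem || !s.2.1 then PySem.Set.add s.1 "RULE_PREF"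
          else if !(PySem.List.pyGetD (bAfter rule) j false) then PySem.Set.add s.1 "RULE_SUFF"
          else PySem.Set.add s.1 "RULE_STEM"
        else s.1
      (res', s.2.1 || PySem.List.pyGetD (bStemStart rule) j false, inStem))
    (res, false, false)).1

-- ===== PRECONDITION & SPEC =====
-- Pre_ excludes exactly the inputs where Python A raises IndexError: the empty rule (seq[-1])
-- and rules with an empty-string chunk (chunk[0])
def Pre_ruleDescription (rule : List String) : Prop := rule ≠ [] ∧ ∀ c ∈ rule, c ≠ ""
instance (rule : List String) : Decidable (Pre_ruleDescription rule) := by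
  unfold Pre_ruleDescription; infer_instance
def pvWitness_ruleDescription : List String := ["ab", "a", "*", "st"]

def Spec_ruleDescription (rule : List String) (out : List String) : Prop := out = ruleDescription_alt rule
instance (rule : List String) (out : List String) : Decidable (Spec_ruleDescription rule out) := by unfold Spec_ruleDescription; infer_instance

-- ===== CLAIM (what is proved, stated in full; the proofs are below) =====
def Claim_equal_ruleDescription : Prop := ∀ (rule : List String), Dom_ruleDescription rule → Pre_ruleDescription rule → Spec_ruleDescription rule (ruleDescription rule)

-- ===== LEMMAS AND PROOFS =====

-- ---- shared proof-side vocabulary ----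

-- rule[j] on the Nat side (total; inside Pre_ every access is in range)
def atD (rule : List String) (j : Nat) : String := rule.getD j ""

-- does position j open a stem run (Nat-side mirror of one bStemStart entry)
def ssB (rule : List String) (j : Nat) : Bool :=
  decide (atD rule j = "*") &&
    (decide (j = 0) || decide (pvHd0 (atD rule j) ≠ pvHd0 (atD rule (j - 1))))

-- does a stem run start strictly after position j
def afterB (rule : List String) (j : Nat) : Bool :=
  ((List.range rule.length).drop (j + 1)).any (ssB rule)

-- one step of B's forward pass, Nat-indexed
def bStep (rule : List String) (s : PySem.Set String × Bool × Bool) (j : Nat) :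
    PySem.Set String × Bool × Bool :=
  let chunk := atD rule j
  let inStem :=
    if decide (j = 0) || decide (pvHd0 chunk ≠ pvHd0 (atD rule (j - 1))) then
      decide (chunk = "*")
    else s.2.2
  let res' :=
    if chunk ≠ "*" then
      if inStem || !s.2.1 then PySem.Set.add s.1 "RULE_PREF"
      else if !(afterB rule j) then PySem.Set.add s.1 "RULE_SUFF"
      else PySem.Set.add s.1 "RULE_STEM"
    else s.1
  (res', s.2.1 || ssB rule j, inStem)

-- is a run a stem run
def isStemRun (r : List String) : Bool := decide (r.getD 0 "" = "*")

-- the common structural middle form: walk the runs once, left to right, carrying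
-- "a stem run occurred earlier" and looking at "a stem run occurs later"
def goFold : Bool → List (List String) → PySem.Set String → PySem.Set String
  | _, [], acc => acc
  | b0, r :: rest, acc =>
    let L : String :=
      if isStemRun r || !b0 then "RULE_PREF"
      else if !(rest.any isStemRun) then "RULE_SUFF"
      else "RULE_STEM"
    goFold (b0 || isStemRun r) rest
      (if r.any (fun c => c ≠ "*") then PySem.Set.add acc L else acc)

-- grouping of rule into runs (left fold, used only by the proofs)
def bRuns (rule : List String) : List (List String) :=
  rule.foldl (fun runs chunk =>
    match runs.getLast? with
    | some last =>
      if pvHd0 (pvRun0 last) = pvHd0 chunk then runs.dropLast ++ [last ++ [chunk]]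
      else runs ++ [[chunk]]
    | none => [[chunk]]) []

def stemsOf (runs : List (List String)) : List Int :=
  (PySem.List.enumerate runs).foldl
    (fun acc q => if pvRun0 q.2 = "*" then acc ++ [q.1] else acc) ([] : List Int)

-- A's label of the run at enumerate-entry p, in purely existential (any) form
def lblE (runs : List (List String)) (p : Int × List String) : String :=
  if decide (pvRun0 p.2 = "*") ||
      !((PySem.List.enumerate runs).any (fun q => decide (pvRun0 q.2 = "*") && decide (q.1 < p.1))) then
    "RULE_PREF"
  else if !((PySem.List.enumerate runs).any (fun q => decide (pvRun0 q.2 = "*") && decide (p.1 < q.1))) then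
    "RULE_SUFF"
  else "RULE_STEM"

-- validity of a run decomposition: runs nonempty with a constant first character,
-- adjacent runs with distinct first characters
def RunsOK (runs : List (List String)) : Prop :=
  (∀ r ∈ runs, r ≠ [] ∧ ∀ c ∈ r, pvHd0 c = pvHd0 (pvRun0 r)) ∧
  List.IsChain (fun r s => pvHd0 (pvRun0 r) ≠ pvHd0 (pvRun0 s)) runs

-- ---- A-side lemmas (run grouping and label conversion) ----

theorem pvRun0_append (l₁ l₂ : List String) (h : l₁ ≠ []) : pvRun0 (l₁ ++ l₂) = pvRun0 l₁ := by
  cases l₁ with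
  | nil => exact absurd rfl h
  | cons a l =>
    have h0 : (0:Int) ≤ (l.length : Int) + (l₂.length : Int) := by positivity
    simp [pvRun0, PySem.List.pyGet?, PySem.List.pyIdx?, h0]

theorem pvRun0_singleton (c : String) : pvRun0 [c] = c := by
  simp [pvRun0, PySem.List.pyGet?, PySem.List.pyIdx?]

theorem pvRun0_eq_getD (r : List String) : pvRun0 r = r.getD 0 "" := by
  cases r with
  | nil => rfl
  | cons a l => simpa using pvRun0_append [a] l (by simp)

theorem runs_loop_eq (rest : List String) : ∀ (done : List (List String)) (curr : List String),
    curr ≠ [] →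
    (chunkRuleLoop rest (some (pvHd0 (pvRun0 curr))) done curr).2 ≠ [] ∧
    (chunkRuleLoop rest (some (pvHd0 (pvRun0 curr))) done curr).1 ++
      [(chunkRuleLoop rest (some (pvHd0 (pvRun0 curr))) done curr).2] =
    rest.foldl (fun runs chunk =>
      match runs.getLast? with
      | some last =>
        if pvHd0 (pvRun0 last) = pvHd0 chunk then runs.dropLast ++ [last ++ [chunk]]
        else runs ++ [[chunk]]
      | none => [[chunk]]) (done ++ [curr]) := by
  induction rest with
  | nil => intro done curr h; exact ⟨h, rfl⟩
  | cons chunk rest ih =>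
    intro done curr h
    rw [chunkRuleLoop]
    simp only [List.foldl_cons, List.getLast?_concat, List.dropLast_concat]
    by_cases hc : pvHd0 (pvRun0 curr) = pvHd0 chunk
    · rw [if_pos (by rw [hc]), if_pos hc]
      have hne : curr ++ [chunk] ≠ [] := by simp
      have := ih done (curr ++ [chunk]) hne
      rwa [pvRun0_append curr [chunk] h] at this
    · rw [if_neg (by simpa [eq_comm] using hc), if_neg hc, if_neg h]
      rw [show pvHd0 chunk = pvHd0 (pvRun0 [chunk]) from by rw [pvRun0_singleton]]
      have := ih (done ++ [curr]) [chunk] (by simp)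
      simpa using this

theorem runs_eq (rule : List String) : chunkRule rule = bRuns rule := by
  cases rule with
  | nil => rfl
  | cons chunk rest =>
    rw [chunkRule, chunkRuleLoop]
    simp only [reduceCtorEq, if_false, if_true]
    rw [show pvHd0 chunk = pvHd0 (pvRun0 [chunk]) from by rw [pvRun0_singleton]]
    obtain ⟨hne, heq⟩ := runs_loop_eq rest [] [chunk] (by simp)
    rw [bRuns, List.foldl_cons]
    simp only [List.getLast?_nil]
    rw [if_neg hne]
    simpa using heq

def sbA (stems : List Int) (i : Int) : Bool :=
  if i ∈ stems then false else decide (stems ≠ [] ∧ i > stems.headD 0)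

def saA (stems : List Int) (i : Int) : Bool :=
  if i ∈ stems then false else decide (stems ≠ [] ∧ i < stems.getLastD 0)

theorem fold_run (run : List String) (L : String) :
    ∀ s : PySem.Set String,
    run.foldl (fun s c => if c = "*" then s else PySem.Set.add s L) s
    = if run.any (fun c => c ≠ "*") then PySem.Set.add s L else s := by
  induction run with
  | nil => intro s; simp
  | cons c run ih =>
    intro s
    by_cases hc : c = "*"
    · simp [hc, ih]
    · simp [hc, ih]

-- the per-character branch chain of A with fixed stemBefore/stemAfter adds one fixed label
theorem inner_fold (run : List String) (sb sa : Bool) (acc : PySem.Set String) :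
    run.foldl (fun x y => if y = "*" then x
      else if sb = false then PySem.Set.add x "RULE_PREF"
      else if sa = false then PySem.Set.add x "RULE_SUFF"
      else if sb && sa then PySem.Set.add x "RULE_STEM"
      else PySem.Set.add x "RULE_SUPPLETIVE") acc
    = if run.any (fun c => c ≠ "*") then
        PySem.Set.add acc (if sb = false then "RULE_PREF" else if sa = false then "RULE_SUFF" else "RULE_STEM")
      else acc := by
  rw [show (fun (x : PySem.Set String) (y : String) => if y = "*" then x
      else if sb = false then PySem.Set.add x "RULE_PREF"
      else if sa = false then PySem.Set.add x "RULE_SUFF"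
      else if sb && sa then PySem.Set.add x "RULE_STEM"
      else PySem.Set.add x "RULE_SUPPLETIVE")
    = (fun x y => if y = "*" then x
        else PySem.Set.add x (if sb = false then "RULE_PREF" else if sa = false then "RULE_SUFF" else "RULE_STEM"))
    from by funext x y; cases sb <;> cases sa <;> by_cases hy : y = "*" <;> simp [hy]]
  exact fold_run run _ acc

theorem locate_eq (seq : List (List String)) :
    locateChunks seq = (PySem.List.enumerate seq).flatMap
      (fun p => p.2.map (fun c => (c, p.1, sbA (stemsOf seq) p.1, saA (stemsOf seq) p.1))) := by
  rw [locateChunks]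
  simp only [PySem.List.foldl_append_eq_flatMap, List.nil_append]
  refine congrArg (fun g => List.flatMap g (PySem.List.enumerate seq)) (funext fun p => ?_)
  by_cases h : p.1 ∈ stemsOf seq
  · have h' := h; simp only [stemsOf] at h'
    simp [sbA, saA, stemsOf, h']
  · have h' := h; simp only [stemsOf] at h'
    simp [sbA, saA, stemsOf, h']

theorem enumerate_fst_inj (xs : List (List String)) (p q : Int × List String)
    (hp : p ∈ PySem.List.enumerate xs) (hq : q ∈ PySem.List.enumerate xs) (h : p.1 = q.1) : p = q := by
  rw [PySem.List.mem_enumerate_iff] at hp hq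
  obtain ⟨k, hk, rfl⟩ := hp
  obtain ⟨k', hk', rfl⟩ := hq
  have : k = k' := by simpa using h
  subst this; rfl

theorem mem_stems_iff (runs : List (List String)) (p : Int × List String)
    (hp : p ∈ PySem.List.enumerate runs) :
    p.1 ∈ stemsOf runs ↔ pvRun0 p.2 = "*" := by
  rw [stemsOf]
  simp only [PySem.List.foldl_append_ite (fun (q : Int × List String) => pvRun0 q.2 = "*") (fun q => q.1)]
  simp only [List.nil_append, List.mem_map, List.mem_filter]
  constructor
  · rintro ⟨q, ⟨hqm, hq⟩, hq1⟩
    have := enumerate_fst_inj runs q p hqm hp hq1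
    subst this
    simpa using hq
  · intro h
    exact ⟨p, ⟨hp, by simpa using h⟩, rfl⟩

theorem mem_stemsOf_iff (runs : List (List String)) (s : Int) :
    s ∈ stemsOf runs ↔ ∃ q ∈ PySem.List.enumerate runs, pvRun0 q.2 = "*" ∧ q.1 = s := by
  rw [stemsOf]
  simp only [PySem.List.foldl_append_ite (fun (q : Int × List String) => pvRun0 q.2 = "*") (fun q => q.1)]
  simp only [List.nil_append, List.mem_map, List.mem_filter]
  constructor
  · rintro ⟨q, ⟨hqm, hq⟩, rfl⟩
    exact ⟨q, hqm, by simpa using hq, rfl⟩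
  · rintro ⟨q, hqm, hq, rfl⟩
    exact ⟨q, ⟨hqm, by simpa using hq⟩, rfl⟩

theorem stems_sorted (runs : List (List String)) : (stemsOf runs).Pairwise (· < ·) := by
  rw [stemsOf]
  simp only [PySem.List.foldl_append_ite (fun (q : Int × List String) => pvRun0 q.2 = "*") (fun q => q.1)]
  simp only [List.nil_append]
  have h1 := PySem.List.pairwise_lt_enumerate runs (s := 0)
  have h2 := h1.filter (fun q => decide (pvRun0 q.2 = "*"))
  exact List.pairwise_map.2 (h2.imp (fun h => h))

theorem headD_mem (l : List Int) (h : l ≠ []) : l.headD 0 ∈ l := by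
  cases l with
  | nil => exact absurd rfl h
  | cons a t => simp

theorem getLastD_mem (l : List Int) (h : l ≠ []) : l.getLastD 0 ∈ l := by
  induction l with
  | nil => exact absurd rfl h
  | cons a t ih =>
    cases t with
    | nil => simp
    | cons b u => exact List.mem_cons_of_mem a (ih (by simp))

theorem sorted_headD_le (l : List Int) (h : l.Pairwise (· < ·)) (s : Int) (hs : s ∈ l) :
    l.headD 0 ≤ s := by
  cases l with
  | nil => simp at hs
  | cons a t =>
    rcases List.mem_cons.1 hs with rfl | hs
    · simp
    · exact le_of_lt (by simpa using (List.pairwise_cons.1 h).1 s hs)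

theorem sorted_le_getLastD (l : List Int) (h : l.Pairwise (· < ·)) (s : Int) (hs : s ∈ l) :
    s ≤ l.getLastD 0 := by
  induction l with
  | nil => simp at hs
  | cons a t ih =>
    rcases List.mem_cons.1 hs with rfl | hs
    · cases t with
      | nil => simp
      | cons b u =>
        have hmem : (b :: u).getLastD 0 ∈ (b :: u) := getLastD_mem _ (by simp)
        have hlt : s < (b :: u).getLastD 0 := (List.pairwise_cons.1 h).1 _ hmem
        simpa [List.getLastD_cons] using le_of_lt hlt
    · have h3 := ih (List.pairwise_cons.1 h).2 hs
      cases t with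
      | nil => simp at hs
      | cons b u => simpa [List.getLastD_cons] using h3


theorem bool_ext (a b : Bool) (h : (a = true) ↔ (b = true)) : a = b := by
  cases a <;> cases b <;> simp_all

theorem anyLt_eq (runs : List (List String)) (i : Int) :
    ((PySem.List.enumerate runs).any (fun q => decide (pvRun0 q.2 = "*") && decide (q.1 < i)))
    = decide ((stemsOf runs) ≠ [] ∧ (stemsOf runs).headD 0 < i) := by
  apply bool_ext
  rw [List.any_eq_true, decide_eq_true_eq]
  simp only [Bool.and_eq_true, decide_eq_true_eq]
  constructor
  · rintro ⟨q, hq, hstem, hlt⟩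
    have hmem : q.1 ∈ stemsOf runs := (mem_stemsOf_iff runs q.1).2 ⟨q, hq, hstem, rfl⟩
    refine ⟨fun hnil => by simp [hnil] at hmem, ?_⟩
    exact lt_of_le_of_lt (sorted_headD_le _ (stems_sorted runs) _ hmem) hlt
  · rintro ⟨hne, hlt⟩
    obtain ⟨q, hq, hstem, hq1⟩ := (mem_stemsOf_iff runs _).1 (headD_mem _ hne)
    exact ⟨q, hq, ⟨hstem, by rw [hq1]; exact hlt⟩⟩

theorem anyGt_eq (runs : List (List String)) (i : Int) :
    ((PySem.List.enumerate runs).any (fun q => decide (pvRun0 q.2 = "*") && decide (i < q.1)))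
    = decide ((stemsOf runs) ≠ [] ∧ i < (stemsOf runs).getLastD 0) := by
  apply bool_ext
  rw [List.any_eq_true, decide_eq_true_eq]
  simp only [Bool.and_eq_true, decide_eq_true_eq]
  constructor
  · rintro ⟨q, hq, hstem, hlt⟩
    have hmem : q.1 ∈ stemsOf runs := (mem_stemsOf_iff runs q.1).2 ⟨q, hq, hstem, rfl⟩
    refine ⟨fun hnil => by simp [hnil] at hmem, ?_⟩
    exact lt_of_lt_of_le hlt (sorted_le_getLastD _ (stems_sorted runs) _ hmem)
  · rintro ⟨hne, hlt⟩
    obtain ⟨q, hq, hstem, hq1⟩ := (mem_stemsOf_iff runs _).1 (getLastD_mem _ hne)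
    exact ⟨q, hq, ⟨hstem, by rw [hq1]; exact hlt⟩⟩

-- A's if-chain label equals the existential-form label, at every entry of enumerate runs
theorem label_exist (runs : List (List String)) (p : Int × List String)
    (hp : p ∈ PySem.List.enumerate runs) :
    (if sbA (stemsOf runs) p.1 = false then "RULE_PREF"
     else if saA (stemsOf runs) p.1 = false then "RULE_SUFF" else "RULE_STEM")
    = lblE runs p := by
  rw [lblE, anyLt_eq, anyGt_eq]
  by_cases hmem : p.1 ∈ stemsOf runs
  · have hstem := (mem_stems_iff runs p hp).1 hmem
    simp [sbA, hmem, hstem]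
  · have hstem : ¬ pvRun0 p.2 = "*" := fun h => hmem ((mem_stems_iff runs p hp).2 h)
    simp only [sbA, saA, if_neg hmem, hstem, decide_false, Bool.false_or]
    by_cases h1 : (stemsOf runs ≠ [] ∧ (stemsOf runs).headD 0 < p.1)
    · have e1 : decide (stemsOf runs ≠ [] ∧ p.1 > (stemsOf runs).headD 0) = true := by
        exact decide_eq_true ⟨h1.1, h1.2⟩
      rw [e1]
      by_cases h2 : (stemsOf runs ≠ [] ∧ p.1 < (stemsOf runs).getLastD 0)
      · rw [decide_eq_true h2]; simp
      · rw [decide_eq_false h2]; simp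
    · have e1 : decide (stemsOf runs ≠ [] ∧ p.1 > (stemsOf runs).headD 0) = false := by
        exact decide_eq_false (fun h => h1 ⟨h.1, h.2⟩)
      rw [e1]
      simp

-- A reduced to the enumerate fold with existential labels
theorem A_to_enum (rule : List String) :
    ruleDescription rule =
    (PySem.List.enumerate (bRuns rule)).foldl
      (fun a p => if p.2.any (fun c => c ≠ "*") then PySem.Set.add a (lblE (bRuns rule) p) else a)
      (if rule = ["*"] then PySem.Set.add PySem.Set.empty "RULE_SYNCRETIC" else PySem.Set.empty) := by
  rw [ruleDescription, runs_eq, locate_eq, List.foldl_flatMap]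
  apply PySem.List.foldl_congr_mem
  intro acc p hp
  rw [List.foldl_map]
  refine (inner_fold p.2 (sbA (stemsOf (bRuns rule)) p.1) (saA (stemsOf (bRuns rule)) p.1) acc).trans ?_
  rw [label_exist (bRuns rule) p hp]

theorem any_enum_before (runsL runsR : List (List String)) :
    ((PySem.List.enumerate (runsL ++ runsR)).any
      (fun q => decide (pvRun0 q.2 = "*") && decide (q.1 < (runsL.length : Int))))
    = runsL.any (fun r => isStemRun r) := by
  apply bool_ext
  simp only [List.any_eq_true, Bool.and_eq_true, decide_eq_true_eq]
  constructor
  · rintro ⟨q, hq, hstem, hlt⟩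
    rw [PySem.List.mem_enumerate_iff] at hq
    obtain ⟨k, hk, rfl⟩ := hq
    simp only [zero_add] at hstem hlt ⊢
    have hkL : k < runsL.length := by exact_mod_cast hlt
    rw [List.getElem_append, dif_pos hkL] at hstem
    refine ⟨runsL[k], List.getElem_mem _, ?_⟩
    rw [isStemRun, ← pvRun0_eq_getD, decide_eq_true_eq]
    exact hstem
  · rintro ⟨r, hr, hstem⟩
    obtain ⟨k, hk, rfl⟩ := List.mem_iff_getElem.1 hr
    have hk2 : k < (runsL ++ runsR).length := by simp; omega
    refine ⟨((k : Int), (runsL ++ runsR)[k]), ?_, ?_, ?_⟩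
    · rw [PySem.List.mem_enumerate_iff]
      exact ⟨k, hk2, by simp⟩
    · show pvRun0 (runsL ++ runsR)[k] = "*"
      rw [List.getElem_append, dif_pos hk]
      rw [isStemRun, ← pvRun0_eq_getD, decide_eq_true_eq] at hstem
      exact hstem
    · show ((k : Int)) < (runsL.length : Int)
      exact_mod_cast hk

theorem any_enum_after (runsL : List (List String)) (r : List String) (runsR : List (List String)) :
    ((PySem.List.enumerate (runsL ++ r :: runsR)).any
      (fun q => decide (pvRun0 q.2 = "*") && decide ((runsL.length : Int) < q.1)))
    = runsR.any (fun r => isStemRun r) := by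
  apply bool_ext
  simp only [List.any_eq_true, Bool.and_eq_true, decide_eq_true_eq]
  constructor
  · rintro ⟨q, hq, hstem, hlt⟩
    rw [PySem.List.mem_enumerate_iff] at hq
    obtain ⟨k, hk, rfl⟩ := hq
    simp only [zero_add] at hstem hlt ⊢
    have hkgt : runsL.length < k := by exact_mod_cast hlt
    obtain ⟨m, rfl⟩ : ∃ m, k = runsL.length + 1 + m := ⟨k - runsL.length - 1, by omega⟩
    have hmR : m < runsR.length := by
      simp only [List.length_append, List.length_cons] at hk; omega
    have he : (runsL ++ r :: runsR)[runsL.length + 1 + m] = runsR[m] := by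
      rw [List.getElem_append_right (by omega)]
      have h3 : runsL.length + 1 + m - runsL.length = m + 1 := by omega
      simp only [h3, List.getElem_cons_succ]
    rw [he] at hstem
    refine ⟨runsR[m], List.getElem_mem _, ?_⟩
    rw [isStemRun, ← pvRun0_eq_getD, decide_eq_true_eq]
    exact hstem
  · rintro ⟨s, hs, hstem⟩
    obtain ⟨k, hk, rfl⟩ := List.mem_iff_getElem.1 hs
    have hk2 : runsL.length + 1 + k < (runsL ++ r :: runsR).length := by simp; omega
    have he : (runsL ++ r :: runsR)[runsL.length + 1 + k] = runsR[k] := by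
      rw [List.getElem_append_right (by omega)]
      have h3 : runsL.length + 1 + k - runsL.length = k + 1 := by omega
      simp only [h3, List.getElem_cons_succ]
    refine ⟨(((runsL.length + 1 + k : Nat) : Int), (runsL ++ r :: runsR)[runsL.length + 1 + k]), ?_, ?_, ?_⟩
    · rw [PySem.List.mem_enumerate_iff]
      exact ⟨runsL.length + 1 + k, hk2, by simp⟩
    · show pvRun0 (runsL ++ r :: runsR)[runsL.length + 1 + k] = "*"
      rw [he]
      rw [isStemRun, ← pvRun0_eq_getD, decide_eq_true_eq] at hstem
      exact hstem
    · show (runsL.length : Int) < ((runsL.length + 1 + k : Nat) : Int)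
      push_cast; omega

-- the enumerate fold over a suffix of the runs equals the structural goFold
theorem enumfold_goFold : ∀ (rest pre : List (List String)) (acc : PySem.Set String),
    (PySem.List.enumerate rest (pre.length : Int)).foldl
      (fun a p => if p.2.any (fun c => c ≠ "*") then PySem.Set.add a (lblE (pre ++ rest) p) else a) acc
    = goFold (pre.any (fun r => isStemRun r)) rest acc := by
  intro rest
  induction rest with
  | nil => intro pre acc; simp [PySem.List.enumerate_nil, goFold]
  | cons r rest' ih =>
    intro pre acc
    rw [PySem.List.enumerate_cons, List.foldl_cons]
    have hL : lblE (pre ++ r :: rest') ((pre.length : Int), r) =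
        (if isStemRun r || !(pre.any (fun r => isStemRun r)) then "RULE_PREF"
         else if !(rest'.any (fun r => isStemRun r)) then "RULE_SUFF" else "RULE_STEM") := by
      rw [lblE]
      simp only [any_enum_before pre (r :: rest'), any_enum_after pre r rest']
      rw [pvRun0_eq_getD]
      rfl
    have hassoc : pre ++ r :: rest' = (pre ++ [r]) ++ rest' := by simp
    have hcast : (pre.length : Int) + 1 = (((pre ++ [r]).length : Nat) : Int) := by
      rw [List.length_append]; push_cast; simp
    simp only [hassoc, hcast]
    rw [ih (pre ++ [r])]
    have hany : ((pre ++ [r]).any (fun r => isStemRun r)) = (pre.any (fun r => isStemRun r) || isStemRun r) := by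
      simp
    rw [hany, goFold]
    simp only [← hassoc]
    rw [hL]

-- ---- run-decomposition validity ----

def bStep1 (runs : List (List String)) (chunk : String) : List (List String) :=
  match runs.getLast? with
  | some last =>
    if pvHd0 (pvRun0 last) = pvHd0 chunk then runs.dropLast ++ [last ++ [chunk]]
    else runs ++ [[chunk]]
  | none => [[chunk]]

theorem bRuns_eq_foldl (rule : List String) : bRuns rule = rule.foldl bStep1 [] := rfl

theorem bStep1_ok (acc : List (List String)) (c : String) (h : RunsOK acc) :
    RunsOK (bStep1 acc c) ∧ (bStep1 acc c).flatten = acc.flatten ++ [c] := by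
  cases hlast : acc.getLast? with
  | none =>
    have hnil : acc = [] := List.getLast?_eq_none_iff.1 hlast
    subst hnil
    simp only [bStep1, List.getLast?_nil]
    refine ⟨⟨?_, List.IsChain.singleton _⟩, by simp⟩
    intro r hr
    simp only [List.mem_singleton] at hr
    subst hr
    exact ⟨by simp, by intro x hx; simp only [List.mem_singleton] at hx; subst hx; rw [pvRun0_singleton]⟩
  | some last =>
    obtain ⟨init, rfl⟩ := List.getLast?_eq_some_iff.1 hlast
    have hlastmem : last ∈ init ++ [last] := by simp
    obtain ⟨hlastne, hlasthd⟩ := h.1 last hlastmem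
    simp only [bStep1, hlast, List.dropLast_concat]
    by_cases heq : pvHd0 (pvRun0 last) = pvHd0 c
    · rw [if_pos heq]
      have hrun0 : pvRun0 (last ++ [c]) = pvRun0 last := pvRun0_append last [c] hlastne
      refine ⟨⟨?_, ?_⟩, by simp⟩
      · intro r hr
        rcases List.mem_append.1 hr with hr | hr
        · exact h.1 r (List.mem_append.2 (Or.inl hr))
        · simp only [List.mem_singleton] at hr
          subst hr
          refine ⟨by simp, ?_⟩
          intro x hx
          rw [hrun0]
          rcases List.mem_append.1 hx with hx | hx
          · exact hlasthd x hx
          · simp only [List.mem_singleton] at hx; subst hx; exact heq.symm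
      · have h2 := List.isChain_append.1 h.2
        refine List.isChain_append.2 ⟨h2.1, List.IsChain.singleton _, ?_⟩
        intro x hx y hy
        simp only [List.head?_cons, Option.mem_some_iff] at hy
        subst hy
        rw [hrun0]
        exact h2.2.2 x hx last (by simp)
    · rw [if_neg heq]
      refine ⟨⟨?_, ?_⟩, by simp⟩
      · intro r hr
        rcases List.mem_append.1 hr with hr | hr
        · exact h.1 r hr
        · simp only [List.mem_singleton] at hr
          subst hr
          exact ⟨by simp, by intro x hx; simp only [List.mem_singleton] at hx; subst hx; rw [pvRun0_singleton]⟩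
      · refine List.isChain_append.2 ⟨h.2, List.IsChain.singleton _, ?_⟩
        intro x hx y hy
        simp only [List.head?_cons, Option.mem_some_iff] at hy
        subst hy
        rw [hlast] at hx
        simp only [Option.mem_some_iff] at hx
        subst hx
        rw [pvRun0_singleton]
        exact heq

theorem bRuns_go : ∀ (rule : List String) (acc : List (List String)), RunsOK acc →
    RunsOK (rule.foldl bStep1 acc) ∧ (rule.foldl bStep1 acc).flatten = acc.flatten ++ rule := by
  intro rule
  induction rule with
  | nil => intro acc h; exact ⟨h, by simp⟩
  | cons c rest ih =>
    intro acc h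
    rw [List.foldl_cons]
    obtain ⟨h1, h2⟩ := bStep1_ok acc c h
    obtain ⟨h3, h4⟩ := ih (bStep1 acc c) h1
    exact ⟨h3, by rw [h4, h2]; simp⟩

theorem bRuns_ok (rule : List String) : RunsOK (bRuns rule) ∧ (bRuns rule).flatten = rule := by
  obtain ⟨h1, h2⟩ := bRuns_go rule [] ⟨by simp, List.IsChain.nil⟩
  rw [bRuns_eq_foldl]
  exact ⟨h1, by simpa using h2⟩

-- ---- positional facts about a valid decomposition ----

theorem range'_split (s m n : Nat) :
    List.range' s (m + n) = List.range' s m ++ List.range' (s + m) n := by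
  simp

theorem atD_run (pre : List (List String)) (r : List String) (rest : List (List String))
    (t : Nat) (ht : t < r.length) :
    atD ((pre ++ r :: rest).flatten) (pre.flatten.length + t) = r.getD t "" := by
  have hflat : (pre ++ r :: rest).flatten = pre.flatten ++ (r ++ rest.flatten) := by simp
  rw [atD, hflat, List.getD, List.getElem?_append_right (by omega)]
  have h2 : pre.flatten.length + t - pre.flatten.length = t := by omega
  rw [h2, List.getElem?_append_left ht]
  rfl

-- the first character seen at a position of run r is r's run character
theorem hd_run (pre : List (List String)) (r : List String) (rest : List (List String))
    (hok : RunsOK (pre ++ r :: rest)) (t : Nat) (ht : t < r.length) :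
    pvHd0 (atD ((pre ++ r :: rest).flatten) (pre.flatten.length + t)) = pvHd0 (pvRun0 r) := by
  rw [atD_run pre r rest t ht, List.getD_eq_getElem r "" ht]
  exact (hok.1 r (by simp)).2 r[t] (List.getElem_mem _)

theorem ss_cond_base (pre : List (List String)) (r : List String) (rest : List (List String))
    (hok : RunsOK (pre ++ r :: rest)) :
    (decide (pre.flatten.length = 0) ||
      decide (pvHd0 (atD ((pre ++ r :: rest).flatten) pre.flatten.length) ≠
              pvHd0 (atD ((pre ++ r :: rest).flatten) (pre.flatten.length - 1)))) = true := by
  rcases List.eq_nil_or_concat pre with hnil | ⟨pinit, plast, hsplit⟩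
  · subst hnil; simp
  · have hsplit' : pre = pinit ++ [plast] := by simpa using hsplit
    subst hsplit'
    have hplast := hok.1 plast (by simp)
    have hplastne := hplast.1
    have hbound : pvHd0 (pvRun0 plast) ≠ pvHd0 (pvRun0 r) := by
      have h2 := (List.isChain_append.1 hok.2).2.2
      exact h2 plast (by simp) r (by simp)
    have hr := hok.1 r (by simp)
    have hrne : 0 < r.length := List.length_pos_iff.2 hr.1
    -- the character before the run boundary is the last chunk of plast
    have hprev : atD ((pinit ++ [plast] ++ r :: rest).flatten)
        ((pinit ++ [plast]).flatten.length - 1) = plast.getLast hplastne := by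
      have hflat : (pinit ++ [plast] ++ r :: rest).flatten
          = (pinit.flatten ++ plast) ++ (r ++ rest.flatten) := by simp
      have hlen : (pinit ++ [plast]).flatten.length = pinit.flatten.length + plast.length := by
        simp
      have hpl : 0 < plast.length := List.length_pos_iff.2 hplastne
      rw [atD, hflat, hlen, List.getD,
        List.getElem?_append_left (l₂ := r ++ rest.flatten) (by simp; omega)]
      rw [List.getElem?_append_right (l₁ := pinit.flatten) (by omega)]
      have h3 : pinit.flatten.length + plast.length - 1 - pinit.flatten.length
          = plast.length - 1 := by omega
      rw [h3, List.getElem?_eq_getElem (by omega)]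
      simp [List.getLast_eq_getElem]
    have hcur : pvHd0 (atD ((pinit ++ [plast] ++ r :: rest).flatten)
        (pinit ++ [plast]).flatten.length) = pvHd0 (pvRun0 r) := by
      have := hd_run (pinit ++ [plast]) r rest hok 0 hrne
      simpa using this
    rw [hcur, hprev]
    have hlast_hd : pvHd0 (plast.getLast hplastne) = pvHd0 (pvRun0 plast) :=
      hplast.2 _ (List.getLast_mem hplastne)
    rw [hlast_hd]
    have : pvHd0 (pvRun0 r) ≠ pvHd0 (pvRun0 plast) := fun h => hbound h.symm
    simp [this]

theorem ss_base (pre : List (List String)) (r : List String) (rest : List (List String))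
    (hok : RunsOK (pre ++ r :: rest)) :
    ssB ((pre ++ r :: rest).flatten) pre.flatten.length = isStemRun r := by
  have hrne : 0 < r.length := List.length_pos_iff.2 (hok.1 r (by simp)).1
  rw [ssB, ss_cond_base pre r rest hok, Bool.and_true]
  have := atD_run pre r rest 0 hrne
  simp only [Nat.add_zero] at this
  rw [this, isStemRun]

theorem ss_cond_interior (pre : List (List String)) (r : List String) (rest : List (List String))
    (hok : RunsOK (pre ++ r :: rest)) (t : Nat) (h0 : 0 < t) (ht : t < r.length) :
    (decide (pre.flatten.length + t = 0) ||
      decide (pvHd0 (atD ((pre ++ r :: rest).flatten) (pre.flatten.length + t)) ≠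
              pvHd0 (atD ((pre ++ r :: rest).flatten) (pre.flatten.length + t - 1)))) = false := by
  have h1 := hd_run pre r rest hok t ht
  have h2 := hd_run pre r rest hok (t - 1) (by omega)
  have h3 : pre.flatten.length + t - 1 = pre.flatten.length + (t - 1) := by omega
  rw [h3, h1, h2]
  have h4 : ¬ (pre.flatten.length + t = 0) := by omega
  rw [decide_eq_false h4]
  simp

theorem ss_interior (pre : List (List String)) (r : List String) (rest : List (List String))
    (hok : RunsOK (pre ++ r :: rest)) (t : Nat) (h0 : 0 < t) (ht : t < r.length) :
    ssB ((pre ++ r :: rest).flatten) (pre.flatten.length + t) = false := by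
  rw [ssB, ss_cond_interior pre r rest hok t h0 ht, Bool.and_false]

-- any ssB over the positions of a suffix of runs = any stem run in the suffix
theorem any_ss_flatten : ∀ (rs pre : List (List String)),
    RunsOK (pre ++ rs) →
    ((List.range' pre.flatten.length rs.flatten.length).any (ssB ((pre ++ rs).flatten)))
    = rs.any (fun r => isStemRun r) := by
  intro rs
  induction rs with
  | nil => intro pre hok; simp
  | cons r rs' ih =>
    intro pre hok
    have hrne : 0 < r.length := List.length_pos_iff.2 (hok.1 r (by simp)).1
    have hlen : (r :: rs').flatten.length = r.length + rs'.flatten.length := by simp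
    rw [hlen, range'_split, List.any_append]
    have hpart1 : (List.range' pre.flatten.length r.length).any (ssB ((pre ++ r :: rs').flatten))
        = isStemRun r := by
      obtain ⟨m, hm⟩ : ∃ m, r.length = m + 1 := ⟨r.length - 1, by omega⟩
      rw [hm, List.range'_succ, List.any_cons, ss_base pre r rs' hok]
      have htail : (List.range' (pre.flatten.length + 1) m).any (ssB ((pre ++ r :: rs').flatten))
          = false := by
        apply List.any_eq_false.2
        intro j hj
        rw [List.mem_range'_1] at hj
        have h1 : j = pre.flatten.length + (j - pre.flatten.length) := by omega
        rw [h1]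
        simp only [Bool.not_eq_true]
        exact ss_interior pre r rs' hok (j - pre.flatten.length) (by omega) (by omega)
      rw [htail, Bool.or_false]
    have hassoc : pre ++ r :: rs' = (pre ++ [r]) ++ rs' := by simp
    have hlen2 : pre.flatten.length + r.length = (pre ++ [r]).flatten.length := by simp
    have hpart2 : (List.range' (pre.flatten.length + r.length) rs'.flatten.length).any
        (ssB ((pre ++ r :: rs').flatten)) = rs'.any (fun r => isStemRun r) := by
      rw [hlen2, hassoc]
      exact ih (pre ++ [r]) (by rw [← hassoc]; exact hok)
    rw [hpart1, hpart2, List.any_cons]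

theorem afterB_run (pre : List (List String)) (r : List String) (rest : List (List String))
    (hok : RunsOK (pre ++ r :: rest)) (t : Nat) (ht : t < r.length) :
    afterB ((pre ++ r :: rest).flatten) (pre.flatten.length + t)
    = rest.any (fun r => isStemRun r) := by
  have hn : (pre ++ r :: rest).flatten.length
      = pre.flatten.length + r.length + rest.flatten.length := by
    simp [Nat.add_assoc]
  rw [afterB, List.range_eq_range', List.drop_range']
  simp only [Nat.mul_one, Nat.zero_add]
  have hsplit : (pre ++ r :: rest).flatten.length - (pre.flatten.length + t + 1)
      = (pre.flatten.length + r.length - (pre.flatten.length + t + 1)) + rest.flatten.length := by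
    omega
  rw [hsplit, range'_split, List.any_append]
  have hpart1 : (List.range' (pre.flatten.length + t + 1)
      (pre.flatten.length + r.length - (pre.flatten.length + t + 1))).any
      (ssB ((pre ++ r :: rest).flatten)) = false := by
    apply List.any_eq_false.2
    intro j hj
    rw [List.mem_range'_1] at hj
    have h1 : j = pre.flatten.length + (j - pre.flatten.length) := by omega
    rw [h1]
    simp only [Bool.not_eq_true]
    exact ss_interior pre r rest hok (j - pre.flatten.length) (by omega) (by omega)
  have hstart : pre.flatten.length + t + 1 +
      (pre.flatten.length + r.length - (pre.flatten.length + t + 1))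
      = (pre ++ [r]).flatten.length := by simp; omega
  have hassoc : pre ++ r :: rest = (pre ++ [r]) ++ rest := by simp
  have hpart2 : (List.range' (pre.flatten.length + t + 1 +
      (pre.flatten.length + r.length - (pre.flatten.length + t + 1))) rest.flatten.length).any
      (ssB ((pre ++ r :: rest).flatten)) = rest.any (fun r => isStemRun r) := by
    rw [hstart, hassoc]
    exact any_ss_flatten rest (pre ++ [r]) (by rw [← hassoc]; exact hok)
  rw [hpart1, hpart2, Bool.false_or]

-- ---- B's forward pass over one run ----

theorem pvSet_chain3 (c1 c2 : Bool) (s : PySem.Set String) (x y z : String) :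
    (if c1 then PySem.Set.add s x else if c2 then PySem.Set.add s y else PySem.Set.add s z)
    = PySem.Set.add s (if c1 then x else if c2 then y else z) := by
  cases c1 <;> cases c2 <;> simp

theorem bStep_eval_mid (rule : List String) (s : PySem.Set String × Bool × Bool) (j : Nat)
    (hcond : (decide (j = 0) ||
      decide (pvHd0 (atD rule j) ≠ pvHd0 (atD rule (j - 1)))) = false) :
    bStep rule s j =
      (if atD rule j = "*" then s.1
        else PySem.Set.add s.1 (if s.2.2 || !s.2.1 then "RULE_PREF"
          else if !(afterB rule j) then "RULE_SUFF" else "RULE_STEM"),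
       s.2.1, s.2.2) := by
  rw [bStep, ssB]
  simp only [hcond, Bool.false_eq_true, if_false, Bool.and_false, Bool.or_false]
  by_cases hc : atD rule j = "*"
  · simp [hc]
  · simp only [hc, ne_eq, not_false_eq_true, if_true, if_false]
    rw [pvSet_chain3]

theorem runtail (rule : List String) : ∀ (cs : List String) (pos : Nat) (b i aft : Bool)
    (acc : PySem.Set String),
    (∀ t < cs.length, atD rule (pos + t) = cs.getD t "") →
    (∀ t < cs.length, (decide (pos + t = 0) ||
        decide (pvHd0 (atD rule (pos + t)) ≠ pvHd0 (atD rule (pos + t - 1)))) = false) →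
    (∀ t < cs.length, afterB rule (pos + t) = aft) →
    (List.range' pos cs.length).foldl (bStep rule) (acc, b, i) =
    (cs.foldl (fun a c => if c = "*" then a
        else PySem.Set.add a (if i || !b then "RULE_PREF" else if !aft then "RULE_SUFF" else "RULE_STEM")) acc,
      b, i) := by
  intro cs
  induction cs with
  | nil => intro pos b i aft acc _ _ _; simp
  | cons c cs' ih =>
    intro pos b i aft acc H1 Hc H4
    rw [List.length_cons, List.range'_succ, List.foldl_cons, List.foldl_cons]
    have h0 : atD rule (pos + 0) = c := by simpa using H1 0 (by simp)
    have hstep := bStep_eval_mid rule (acc, b, i) pos (by simpa using Hc 0 (by simp))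
    simp only [Nat.add_zero] at h0
    rw [h0] at hstep
    have haft0 : afterB rule pos = aft := by simpa using H4 0 (by simp)
    rw [haft0] at hstep
    rw [hstep]
    exact ih (pos + 1) b i aft _
      (fun t ht => by
        have := H1 (t + 1) (by simpa using Nat.succ_lt_succ ht)
        simpa [Nat.add_assoc, Nat.add_comm 1 t] using this)
      (fun t ht => by
        have := Hc (t + 1) (by simpa using Nat.succ_lt_succ ht)
        simpa [Nat.add_assoc, Nat.add_comm 1 t] using this)
      (fun t ht => by
        have := H4 (t + 1) (by simpa using Nat.succ_lt_succ ht)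
        simpa [Nat.add_assoc, Nat.add_comm 1 t] using this)

theorem label_shift (st b0 aft : Bool) :
    (if st || !(b0 || st) then "RULE_PREF" else if !aft then "RULE_SUFF" else "RULE_STEM")
    = (if st || !b0 then "RULE_PREF" else if !aft then "RULE_SUFF" else "RULE_STEM") := by
  cases st <;> cases b0 <;> simp

theorem bStep_eval_start (rule : List String) (s : PySem.Set String × Bool × Bool) (j : Nat)
    (hcond : (decide (j = 0) ||
      decide (pvHd0 (atD rule j) ≠ pvHd0 (atD rule (j - 1)))) = true) :
    bStep rule s j =
      (if atD rule j = "*" then s.1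
        else PySem.Set.add s.1 (if decide (atD rule j = "*") || !s.2.1 then "RULE_PREF"
          else if !(afterB rule j) then "RULE_SUFF" else "RULE_STEM"),
       s.2.1 || decide (atD rule j = "*"), decide (atD rule j = "*")) := by
  rw [bStep, ssB]
  simp only [hcond, if_true, Bool.and_true]
  by_cases hc : atD rule j = "*"
  · simp [hc]
  · simp only [hc, ne_eq, not_false_eq_true, if_true, if_false]
    rw [pvSet_chain3]

theorem runfold (rule : List String) (base : Nat) (r : List String) (aft b0 i0 : Bool)
    (acc : PySem.Set String) (hr : r ≠ [])
    (H1 : ∀ t < r.length, atD rule (base + t) = r.getD t "")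
    (H2 : (decide (base = 0) ||
        decide (pvHd0 (atD rule base) ≠ pvHd0 (atD rule (base - 1)))) = true)
    (Hc : ∀ t, 0 < t → t < r.length → (decide (base + t = 0) ||
        decide (pvHd0 (atD rule (base + t)) ≠ pvHd0 (atD rule (base + t - 1)))) = false)
    (H4 : ∀ t < r.length, afterB rule (base + t) = aft) :
    (List.range' base r.length).foldl (bStep rule) (acc, b0, i0) =
    (if r.any (fun c => c ≠ "*") then
        PySem.Set.add acc (if isStemRun r || !b0 then "RULE_PREF"
          else if !aft then "RULE_SUFF" else "RULE_STEM")
      else acc,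
     b0 || isStemRun r, isStemRun r) := by
  obtain ⟨c, cs, rfl⟩ : ∃ c cs, r = c :: cs := by
    cases r with
    | nil => exact absurd rfl hr
    | cons c cs => exact ⟨c, cs, rfl⟩
  have hst : isStemRun (c :: cs) = decide (c = "*") := rfl
  have h0 : atD rule base = c := by simpa using H1 0 (by simp)
  rw [List.length_cons, List.range'_succ, List.foldl_cons]
  have hstep := bStep_eval_start rule (acc, b0, i0) base H2
  rw [h0] at hstep
  have haft0 : afterB rule base = aft := by simpa using H4 0 (by simp)
  rw [haft0] at hstep
  rw [hstep]
  rw [runtail rule cs (base + 1) (b0 || decide (c = "*")) (decide (c = "*")) aft _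
    (fun t ht => by
      have := H1 (t + 1) (by simpa using Nat.succ_lt_succ ht)
      simpa [Nat.add_assoc, Nat.add_comm 1 t] using this)
    (fun t ht => by
      have := Hc (t + 1) (by simp) (by simpa using Nat.succ_lt_succ ht)
      simpa [Nat.add_assoc, Nat.add_comm 1 t] using this)
    (fun t ht => by
      have := H4 (t + 1) (by simpa using Nat.succ_lt_succ ht)
      simpa [Nat.add_assoc, Nat.add_comm 1 t] using this)]
  rw [hst]
  have hlbl := label_shift (decide (c = "*")) b0 aft
  rw [hlbl]
  rw [fold_run cs (if decide (c = "*") || !b0 then "RULE_PREF"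
    else if !aft then "RULE_SUFF" else "RULE_STEM")]
  by_cases hc : c = "*"
  · rw [if_pos hc]
    simp [List.any_cons, hc]
  · rw [if_neg hc]
    by_cases hany : cs.any (fun x => decide (x ≠ "*")) = true
    · simp [List.any_cons, hc]
    · rw [Bool.not_eq_true] at hany
      simp [List.any_cons, hc]

-- ---- the crux: B's positional pass equals the structural goFold ----

theorem crux : ∀ (rest pre : List (List String)) (acc : PySem.Set String) (s0 : Bool),
    RunsOK (pre ++ rest) →
    ((List.range' pre.flatten.length rest.flatten.length).foldl (bStep ((pre ++ rest).flatten))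
      (acc, pre.any (fun r => isStemRun r), s0)).1
    = goFold (pre.any (fun r => isStemRun r)) rest acc := by
  intro rest
  induction rest with
  | nil => intro pre acc s0 hok; simp [goFold]
  | cons r rest' ih =>
    intro pre acc s0 hok
    have hrne : r ≠ [] := (hok.1 r (by simp)).1
    have hlen : (r :: rest').flatten.length = r.length + rest'.flatten.length := by simp
    rw [hlen, range'_split, List.foldl_append]
    rw [runfold ((pre ++ r :: rest').flatten) pre.flatten.length r
      (rest'.any (fun r => isStemRun r)) (pre.any (fun r => isStemRun r)) s0 acc hrne
      (fun t ht => atD_run pre r rest' t ht)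
      (ss_cond_base pre r rest' hok)
      (fun t h0 ht => ss_cond_interior pre r rest' hok t h0 ht)
      (fun t ht => afterB_run pre r rest' hok t ht)]
    have hassoc : pre ++ r :: rest' = (pre ++ [r]) ++ rest' := by simp
    have hlen2 : pre.flatten.length + r.length = (pre ++ [r]).flatten.length := by simp
    have hany : ((pre ++ [r]).any (fun r => isStemRun r))
        = (pre.any (fun r => isStemRun r) || isStemRun r) := by simp
    rw [goFold]
    simp only [hassoc, hlen2, ← hany]
    exact ih (pre ++ [r]) _ (isStemRun r) (by rw [← hassoc]; exact hok)

-- ---- normalizing B's port to the Nat-side fold ----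

theorem bStemStart_eq (rule : List String) :
    bStemStart rule = (List.range rule.length).map (ssB rule) := by
  rw [bStemStart, PySem.List.len_eq, PySem.List.pyRange_zero_natCast, List.map_map]
  apply List.map_congr_left
  intro j hj
  simp only [Function.comp_apply]
  have hchunk : PySem.List.pyGetD rule ((j : Nat) : Int) "" = atD rule j := by
    rw [PySem.List.pyGetD_natCast]; rfl
  rw [hchunk]
  cases j with
  | zero =>
    rw [ssB]
    have h1 : decide (((0 : Nat) : Int) = 0) = true := by simp
    have h2 : decide ((0 : Nat) = 0) = true := by simp
    rw [h1, h2, Bool.true_or, Bool.true_or]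
  | succ k =>
    rw [ssB]
    have h0 : ((k + 1 : Nat) : Int) ≠ 0 := by exact_mod_cast Nat.succ_ne_zero k
    have h1 : decide (((k + 1 : Nat) : Int) = 0) = false := decide_eq_false h0
    have h2 : decide ((k + 1 : Nat) = 0) = false := decide_eq_false (Nat.succ_ne_zero k)
    have hidx : ((k + 1 : Nat) : Int) - 1 = ((k : Nat) : Int) := by push_cast; ring
    rw [h1, h2, hidx, PySem.List.pyGetD_natCast, Bool.false_or, Bool.false_or,
      Nat.add_sub_cancel]
    rfl

theorem revscan : ∀ (bs acc : List Bool) (seen : Bool),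
    (bs.foldl (fun (p : List Bool × Bool) flag => (p.1 ++ [p.2], p.2 || flag)) (acc, seen)).1
    = acc ++ (List.range bs.length).map (fun t => seen || (bs.take t).any id) := by
  intro bs
  induction bs with
  | nil => intro acc seen; simp
  | cons bflag bs' ih =>
    intro acc seen
    rw [List.foldl_cons, ih, List.length_cons, List.range_succ_eq_map, List.map_cons, List.map_map]
    have hfun : ((fun t => seen || (((bflag :: bs').take t).any id)) ∘ (· + 1))
        = (fun t => (seen || bflag) || ((bs'.take t).any id)) := by
      funext t
      simp [List.take_succ_cons, Bool.or_assoc]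
    rw [hfun]
    simp

theorem bAfter_getD (rule : List String) (j : Nat) (hj : j < rule.length) :
    (bAfter rule).getD j false = afterB rule j := by
  have hlenss : (bStemStart rule).length = rule.length := by
    rw [bStemStart_eq]; simp
  rw [bAfter, revscan]
  simp only [List.nil_append, Bool.false_or]
  have hlenrev : (bStemStart rule).reverse.length = rule.length := by simp [hlenss]
  rw [hlenrev]
  have hlenmap : ((List.range rule.length).map
      (fun t => ((bStemStart rule).reverse.take t).any id)).length = rule.length := by simp
  rw [List.getD_eq_getElem _ _ (by rw [List.length_reverse, hlenmap]; exact hj)]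
  rw [List.getElem_reverse]
  rw [List.getElem_map, List.getElem_range]
  rw [hlenmap]
  rw [List.take_reverse, List.any_reverse]
  have hdropidx : (bStemStart rule).length - (rule.length - 1 - j) = j + 1 := by
    rw [hlenss]; omega
  rw [hdropidx, bStemStart_eq,
    show List.drop (j + 1) (List.map (ssB rule) (List.range rule.length))
      = (List.drop (j + 1) (List.range rule.length)).map (ssB rule) from (List.map_drop ..).symm]
  rw [afterB]
  simp only [List.any_map, Function.comp_def, id_eq]

theorem bStep_port_eq (rule : List String) (s : PySem.Set String × Bool × Bool) (j : Nat)
    (hj : j < rule.length) :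
    (fun (s : PySem.Set String × Bool × Bool) (i : Int) =>
      let chunk := PySem.List.pyGetD rule i ""
      let inStem :=
        if decide (i = 0) || decide (pvHd0 chunk ≠ pvHd0 (PySem.List.pyGetD rule (i - 1) "")) then
          decide (chunk = "*")
        else s.2.2
      let res' :=
        if chunk ≠ "*" then
          if inStem || !s.2.1 then PySem.Set.add s.1 "RULE_PREF"
          else if !(PySem.List.pyGetD (bAfter rule) i false) then PySem.Set.add s.1 "RULE_SUFF"
          else PySem.Set.add s.1 "RULE_STEM"
        else s.1
      (res', s.2.1 || PySem.List.pyGetD (bStemStart rule) i false, inStem)) s ((j : Nat) : Int)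
    = bStep rule s j := by
  have hchunk : PySem.List.pyGetD rule ((j : Nat) : Int) "" = atD rule j := by
    rw [PySem.List.pyGetD_natCast]; rfl
  have hafter : PySem.List.pyGetD (bAfter rule) ((j : Nat) : Int) false = afterB rule j := by
    rw [PySem.List.pyGetD_natCast]
    exact bAfter_getD rule j hj
  have hss : PySem.List.pyGetD (bStemStart rule) ((j : Nat) : Int) false = ssB rule j := by
    rw [PySem.List.pyGetD_natCast, bStemStart_eq]
    exact PySem.List.getD_map_range (ssB rule) rule.length j false hj
  have hcond : (decide (((j : Nat) : Int) = 0) ||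
      decide (pvHd0 (atD rule j) ≠ pvHd0 (PySem.List.pyGetD rule (((j : Nat) : Int) - 1) ""))) =
      (decide (j = 0) || decide (pvHd0 (atD rule j) ≠ pvHd0 (atD rule (j - 1)))) := by
    cases j with
    | zero =>
      have h1 : decide (((0 : Nat) : Int) = 0) = true := by simp
      have h2 : decide ((0 : Nat) = 0) = true := by simp
      rw [h1, h2, Bool.true_or, Bool.true_or]
    | succ k =>
      have h0 : ((k + 1 : Nat) : Int) ≠ 0 := by exact_mod_cast Nat.succ_ne_zero k
      have h1 : decide (((k + 1 : Nat) : Int) = 0) = false := decide_eq_false h0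
      have h2 : decide ((k + 1 : Nat) = 0) = false := decide_eq_false (Nat.succ_ne_zero k)
      have hidx : ((k + 1 : Nat) : Int) - 1 = ((k : Nat) : Int) := by push_cast; ring
      rw [h1, h2, hidx, PySem.List.pyGetD_natCast, Bool.false_or, Bool.false_or,
        Nat.add_sub_cancel]
      rfl
  rw [bStep]
  simp only [hchunk, hcond, hafter, hss]

theorem B_norm (rule : List String) :
    ruleDescription_alt rule =
    ((List.range rule.length).foldl (bStep rule)
      ((if rule = ["*"] then PySem.Set.add PySem.Set.empty "RULE_SYNCRETIC" else PySem.Set.empty),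
        false, false)).1 := by
  rw [ruleDescription_alt, PySem.List.len_eq, PySem.List.pyRange_zero_natCast, List.foldl_map]
  apply congrArg (fun s => Prod.fst s)
  apply PySem.List.foldl_congr_mem
  intro acc j hj
  exact bStep_port_eq rule acc j (List.mem_range.1 hj)

theorem ruleDescription_total_eq (rule : List String) :
    ruleDescription rule = ruleDescription_alt rule := by
  obtain ⟨hok, hflat⟩ := bRuns_ok rule
  rw [A_to_enum, B_norm]
  have hA := enumfold_goFold (bRuns rule) []
    (if rule = ["*"] then PySem.Set.add PySem.Set.empty "RULE_SYNCRETIC" else PySem.Set.empty)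
  simp only [List.length_nil, Nat.cast_zero, List.nil_append, List.any_nil] at hA
  have hB := crux (bRuns rule) []
    (if rule = ["*"] then PySem.Set.add PySem.Set.empty "RULE_SYNCRETIC" else PySem.Set.empty)
    false (by simpa using hok)
  simp only [List.nil_append, List.flatten_nil, List.length_nil, List.any_nil] at hB
  rw [hflat] at hB
  rw [← List.range_eq_range'] at hB
  exact hA.trans hB.symm

-- ===== VERDICT (by name: the statement is the Claim_ definition above) =====
theorem ruleDescription_spec : Claim_equal_ruleDescription := by
  intro rule _ _
  exact ruleDescription_total_eq rule
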